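-- pv_equiv track=rewrite | github.com/KingTik/pracmag | pauzy.py | get_pauses
-- ===== SOURCE A (Python) =====
-- def get_pauses(indexes):
-- 	# start - poczatek nowego slowe; end - koniec poprzedniego slowa
-- 	pauses=[]
--
-- 	end = indexes[0]
--
-- 	for i in range(len(indexes)-1):
-- 		if indexes[i+1]== indexes[i]+1:
-- 			end = indexes[i+1]
-- 		else:
-- 			start = indexes[i+1]
-- 			pauses.append(start-end)
-- 			end = start
--
-- 	return pauses
-- ===== SOURCE B (Python) =====
-- def get_pauses(indexes):
--     # Two staged passes: first group the indexes into maximal runs of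
--     # consecutive (+1) integers, then emit the gap between each adjacent
--     # pair of runs (start of next run minus end of previous run).
--     runs = []
--     current = [indexes[0]]
--     for x in indexes[1:]:
--         if x == current[-1] + 1:
--             current.append(x)
--         else:
--             runs.append(current)
--             current = [x]
--     runs.append(current)
--     return [nxt[0] - prev[-1] for prev, nxt in zip(runs, runs[1:])]
-- ===== Notes on version B (the rewrite author's own statement) =====
-- stated objective: alternative
-- what changed: Replaces A's single loop with mutable end/start scalars by a two-stage pipeline: first build the explicit list of maximal runs of consecutive integers, then compute each pause as next-run-start minus previous-run-end over adjacent run pairs.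
import Mathlib
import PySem

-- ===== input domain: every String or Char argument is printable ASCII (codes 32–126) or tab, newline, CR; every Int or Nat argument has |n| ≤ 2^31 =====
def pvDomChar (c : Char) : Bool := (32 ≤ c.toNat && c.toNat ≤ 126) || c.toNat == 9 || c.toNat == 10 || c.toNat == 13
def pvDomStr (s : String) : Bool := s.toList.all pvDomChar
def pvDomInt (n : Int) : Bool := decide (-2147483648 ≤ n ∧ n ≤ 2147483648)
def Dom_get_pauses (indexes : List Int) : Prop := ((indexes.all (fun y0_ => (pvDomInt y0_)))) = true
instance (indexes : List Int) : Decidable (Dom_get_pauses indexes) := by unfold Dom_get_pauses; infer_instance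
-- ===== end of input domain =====

-- B restructures A's single stateful loop as a two-stage pipeline: build the
-- list of maximal consecutive runs, then emit gaps between adjacent runs
-- (alternative decomposition); return values proved equal on nonempty lists.


-- ===== PORT A =====
-- A reads indexes[0] before the loop (IndexError on the empty list; Pre_ excludes it,
-- so headD 0 is exact on Pre_), then loops i over range(len-1).
def get_pauses (indexes : List Int) : List Int :=
  (((PySem.List.pyRange 0 ((indexes.length : Int) - 1) 1).foldl
      (fun (s : List Int × Int) i =>
        if PySem.List.pyGetD indexes (i + 1) 0 = PySem.List.pyGetD indexes i 0 + 1 then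
          (s.1, PySem.List.pyGetD indexes (i + 1) 0)
        else
          (s.1 ++ [PySem.List.pyGetD indexes (i + 1) 0 - s.2], PySem.List.pyGetD indexes (i + 1) 0))
      ([], indexes.headD 0))).1

-- ===== PORT B =====
-- B also reads indexes[0] first (headD 0 exact on Pre_); `current` is never empty
-- in Source B, so current[-1] is getLast! and nxt[0] is headD 0, both exact.
def get_pauses_alt (indexes : List Int) : List Int :=
  let st := (indexes.drop 1).foldl
    (fun (s : List (List Int) × List Int) (x : Int) =>
      if x = s.2.getLast! + 1 then (s.1, s.2 ++ [x])
      else (s.1 ++ [s.2], [x]))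
    ([], [indexes.headD 0])
  let runs := st.1 ++ [st.2]
  (runs.zip (runs.drop 1)).map (fun p => p.2.headD 0 - p.1.getLast!)

-- ===== PRECONDITION & SPEC =====
-- Both programs read the first element unconditionally, so the empty list raises
-- IndexError; Pre_ excludes exactly it.
def Pre_get_pauses (indexes : List Int) : Prop := indexes ≠ []
instance (indexes : List Int) : Decidable (Pre_get_pauses indexes) := by unfold Pre_get_pauses; infer_instance
def pvWitness_get_pauses : List Int := [1, 2, 5]

def Spec_get_pauses (indexes : List Int) (out : List Int) : Prop := out = get_pauses_alt indexes
instance (indexes : List Int) (out : List Int) : Decidable (Spec_get_pauses indexes out) := by unfold Spec_get_pauses; infer_instance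

-- ===== CLAIM (what is proved, stated in full; the proofs are below) =====
def Claim_equal_get_pauses : Prop := ∀ (indexes : List Int), Dom_get_pauses indexes → Pre_get_pauses indexes → Spec_get_pauses indexes (get_pauses indexes)

-- ===== LEMMAS AND PROOFS =====

-- Common reference form: the gaps of adjacent non-consecutive pairs.
def pairGaps (xs : List Int) : List Int :=
  ((xs.zip (xs.drop 1)).filter (fun p => !(p.2 == p.1 + 1))).map (fun p => p.2 - p.1)

-- The 0..len-2 index loop of A reads exactly the adjacent pairs of the list.
lemma pairs_of_range (xs : List Int) :
    (PySem.List.pyRange 0 ((xs.length : Int) - 1) 1).map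
        (fun i => (PySem.List.pyGetD xs i 0, PySem.List.pyGetD xs (i + 1) 0))
      = xs.zip (xs.drop 1) := by
  apply List.ext_getElem
  · simp [PySem.List.length_pyRange_one]
  · intro k h1 h2
    have hk2 : k + 1 < xs.length := by
      simp [PySem.List.length_pyRange_one] at h1; omega
    have hk1 : k < xs.length := by omega
    simp only [List.getElem_map, PySem.List.getElem_pyRange_one, List.getElem_zip,
      List.getElem_drop, zero_add, Prod.mk.injEq]
    constructor
    · rw [PySem.List.pyGetD_natCast]
      exact List.getD_eq_getElem xs 0 hk1
    · rw [show ((k : Int) + 1) = ((k + 1 : Nat) : Int) from by push_cast; ring,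
        PySem.List.pyGetD_natCast]
      simpa [Nat.add_comm] using List.getD_eq_getElem xs 0 hk2

-- A's fold over the pair list: the carried `end` is always the previous element,
-- so each appended gap is p.2 - p.1 of a non-consecutive adjacent pair.
lemma fold_pairs (x : Int) (xs : List Int) (acc : List Int) :
    ((((x :: xs).zip xs).foldl
        (fun (s : List Int × Int) p =>
          if p.2 = p.1 + 1 then (s.1, p.2) else (s.1 ++ [p.2 - s.2], p.2))
        (acc, x))).1
      = acc ++ (((x :: xs).zip xs).filter (fun p => !(p.2 == p.1 + 1))).map (fun p => p.2 - p.1) := by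
  induction xs generalizing x acc with
  | nil => simp
  | cons y ys ih =>
    simp only [List.zip_cons_cons, List.foldl_cons, List.filter_cons]
    by_cases h : y = x + 1
    · subst h
      rw [if_pos rfl]
      simp only [beq_self_eq_true, Bool.not_true, Bool.false_eq_true, if_false]
      exact ih (x + 1) acc
    · rw [if_neg h, if_pos (show (!(y == x + 1)) = true by simp [h])]
      rw [ih y (acc ++ [y - x])]
      simp

-- Recursive characterisation of B's first pass: the maximal consecutive runs.
def runsFrom : List Int → List Int → List (List Int)
  | c, [] => [c]
  | c, y :: ys => if y = c.getLast! + 1 then runsFrom (c ++ [y]) ys else c :: runsFrom [y] ys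

lemma runsFrom_ne_nil (c ys) : runsFrom c ys ≠ [] := by
  induction ys generalizing c with
  | nil => simp [runsFrom]
  | cons y ys ih =>
    simp only [runsFrom]
    split
    · exact ih _
    · simp

lemma runsFrom_head (c ys) (hc : c ≠ []) :
    ((runsFrom c ys).headD []).headD 0 = c.headD 0 := by
  induction ys generalizing c with
  | nil => simp [runsFrom]
  | cons y ys ih =>
    simp only [runsFrom]
    split
    · rw [ih (c ++ [y]) (by simp)]
      cases c with
      | nil => exact absurd rfl hc
      | cons a as => simp
    · simp

-- B's fold builds exactly runsFrom.
lemma fold_runs (ys : List Int) (rs : List (List Int)) (c : List Int) :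
    (ys.foldl
        (fun (s : List (List Int) × List Int) (x : Int) =>
          if x = s.2.getLast! + 1 then (s.1, s.2 ++ [x])
          else (s.1 ++ [s.2], [x])) (rs, c)).1
      ++ [(ys.foldl
        (fun (s : List (List Int) × List Int) (x : Int) =>
          if x = s.2.getLast! + 1 then (s.1, s.2 ++ [x])
          else (s.1 ++ [s.2], [x])) (rs, c)).2] = rs ++ runsFrom c ys := by
  induction ys generalizing rs c with
  | nil => simp [runsFrom]
  | cons y ys ih =>
    simp only [List.foldl_cons, runsFrom]
    split
    · exact ih rs (c ++ [y])
    · rw [ih (rs ++ [c]) [y]]; simp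

def gapsOf (rs : List (List Int)) : List Int :=
  (rs.zip rs.tail).map (fun p => p.2.headD 0 - p.1.getLast!)

lemma gapsOf_cons (c : List Int) (rs : List (List Int)) (h : rs ≠ []) :
    gapsOf (c :: rs) = ((rs.headD []).headD 0 - c.getLast!) :: gapsOf rs := by
  cases rs with
  | nil => exact absurd rfl h
  | cons r rs' => simp [gapsOf]

-- The gaps between adjacent runs are exactly the non-consecutive pair gaps.
lemma gapsOf_runsFrom (ys : List Int) (c : List Int) (hc : c ≠ []) :
    gapsOf (runsFrom c ys) = pairGaps (c.getLast! :: ys) := by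
  induction ys generalizing c with
  | nil => simp [runsFrom, gapsOf, pairGaps]
  | cons y ys ih =>
    simp only [runsFrom]
    by_cases h : y = c.getLast! + 1
    · rw [if_pos h, ih (c ++ [y]) (by simp)]
      simp [pairGaps, h]
    · rw [if_neg h, gapsOf_cons _ _ (runsFrom_ne_nil _ _), ih [y] (by simp),
        runsFrom_head [y] ys (by simp)]
      rw [show (([y] : List Int)).getLast! = y from rfl,
        show (([y] : List Int)).headD 0 = y from rfl]
      simp only [pairGaps, List.drop_one, List.tail_cons, List.zip_cons_cons, List.filter_cons]
      rw [if_pos (show (!(y == c.getLast! + 1)) = true by rw [beq_eq_false_iff_ne.mpr h]; rfl)]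
      simp

-- B computes the pair gaps.
lemma alt_eq_pairGaps (x : Int) (xs : List Int) :
    get_pauses_alt (x :: xs) = pairGaps (x :: xs) := by
  unfold get_pauses_alt
  simp only [List.drop_one, List.tail_cons, List.headD_cons]
  have hg : ∀ R : List (List Int),
      (R.zip R.tail).map (fun p => p.2.headD 0 - p.1.getLast!) = gapsOf R := fun _ => rfl
  rw [hg, fold_runs xs [] [x]]
  have := gapsOf_runsFrom xs [x] (by simp)
  rw [show (([x] : List Int)).getLast! = x from rfl] at this
  simpa using this

theorem get_pauses_spec : Claim_equal_get_pauses := by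
  intro indexes _ hpre
  unfold Spec_get_pauses
  cases indexes with
  | nil => exact absurd rfl hpre
  | cons x xs =>
    rw [alt_eq_pairGaps]
    unfold get_pauses
    have key : (PySem.List.pyRange 0 (((x :: xs).length : Int) - 1) 1).foldl
        (fun (s : List Int × Int) i =>
          if PySem.List.pyGetD (x :: xs) (i + 1) 0 = PySem.List.pyGetD (x :: xs) i 0 + 1 then
            (s.1, PySem.List.pyGetD (x :: xs) (i + 1) 0)
          else (s.1 ++ [PySem.List.pyGetD (x :: xs) (i + 1) 0 - s.2], PySem.List.pyGetD (x :: xs) (i + 1) 0))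
        ([], x)
        = ((x :: xs).zip ((x :: xs).drop 1)).foldl
            (fun (s : List Int × Int) p =>
              if p.2 = p.1 + 1 then (s.1, p.2) else (s.1 ++ [p.2 - s.2], p.2)) ([], x) := by
      rw [← pairs_of_range (x :: xs), List.foldl_map]
    simp only [List.headD_cons]
    rw [key]
    simpa [pairGaps] using fold_pairs x xs []
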